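-- pv_equiv track=rewrite | github.com/Athenais-Zhang/decisionTree_Distance | DTforCurrency/tools.py | __rankDistance
-- ===== SOURCE A (Python) =====
-- def __rankDistance(seq1, seq2):
--     u1 = {}
--     u2 = {}
--     for index in range(len(seq1)):
--         if seq1[index] not in u1:
--             u1[seq1[index]] = []
--         u1[seq1[index]].append(index + 1)
--
--     for index in range(len(seq2)):
--         if seq2[index] not in u2:
--             u2[seq2[index]] = []
--         u2[seq2[index]].append(index + 1)
--
--     dis = 0
--     for item in u1:
--         if item not in u2:
--             for pos in u1[item]:
--                 dis += pos
--         else: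
--             p1 = u1[item]
--             p2 = u2[item]
--             len1 = len(p1)
--             len2 = len(p2)
--             if len1 > len2:
--                 for index in range(len2):
--                     dis += abs(p1[index] - p2[index])
--                 for index in range(len2, len1):
--                     dis += p1[index]
--             else:
--                 for index in range(len1):
--                     dis += abs(p1[index] - p2[index])
--                 for index in range(len1, len2):
--                     dis += p2[index]
--             u2.pop(item)
--     for item in u2:
--         for pos in u2[item]:
--             dis += pos
--     return dis
-- ===== SOURCE B (Python) =====
-- def __rankDistance(seq1, seq2):
--     # Closed-form position totals minus twice the summed first-arrival times of
--     # matched occurrence pairs, collected in one synchronized left-to-right scan.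
--     n, m = len(seq1), len(seq2)
--     c1 = {}
--     for v in seq1:
--         c1[v] = c1.get(v, 0) + 1
--     c2 = {}
--     for v in seq2:
--         c2[v] = c2.get(v, 0) + 1
--     a1 = {}
--     a2 = {}
--     M = 0
--     for i in range(max(n, m)):
--         t = i + 1
--         if i < n:
--             v = seq1[i]
--             k = a1.get(v, 0)
--             a1[v] = k + 1
--             if k < c2.get(v, 0) and a2.get(v, 0) <= k:
--                 M += t
--         if i < m:
--             w = seq2[i]
--             k = a2.get(w, 0)
--             a2[w] = k + 1
--             if k < c1.get(w, 0) and a1.get(w, 0) <= k: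
--                 M += t
--     return n * (n + 1) // 2 + m * (m + 1) // 2 - 2 * M
-- ===== Notes on version B (the rewrite author's own statement) =====
-- stated objective: alternative
-- what changed: Replaces A's per-value position lists, |p1-p2| paired loops and pop/leftover pass by an arithmetic reformulation: total = n(n+1)/2 + m(m+1)/2 - 2*M, where M is the sum of first-arrival times of matched occurrence pairs, collected in a single synchronized left-to-right scan over both sequences that maintains only per-value counters (no position lists and no absolute differences anywhere).
import Mathlib
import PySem

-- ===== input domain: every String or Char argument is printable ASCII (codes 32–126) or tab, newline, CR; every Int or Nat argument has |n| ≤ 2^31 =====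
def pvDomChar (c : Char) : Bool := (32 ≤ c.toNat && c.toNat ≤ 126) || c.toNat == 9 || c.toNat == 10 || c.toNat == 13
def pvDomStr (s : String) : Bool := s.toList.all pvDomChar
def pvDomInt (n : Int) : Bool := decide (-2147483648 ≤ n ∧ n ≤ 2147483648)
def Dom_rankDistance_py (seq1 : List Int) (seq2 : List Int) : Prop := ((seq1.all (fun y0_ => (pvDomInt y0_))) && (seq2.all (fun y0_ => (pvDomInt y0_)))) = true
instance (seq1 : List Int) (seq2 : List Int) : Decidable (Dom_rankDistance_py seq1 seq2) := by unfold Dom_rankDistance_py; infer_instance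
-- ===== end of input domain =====

-- B is an alternative algorithm of the same cost: closed-form position totals minus twice
-- the summed first-arrival times of matched occurrence pairs, collected in one synchronized
-- scan with per-value counters only (no position lists, no absolute differences).

-- ===== PORT A =====
-- first two loops of A: build {value -> list of 1-based positions}
def pvBuild (s : List Int) : PySem.Dict Int (List Int) :=
  (PySem.List.pyRange 0 (PySem.List.len s)).foldl
    (fun u index =>
      let key := PySem.List.pyGetD s index 0   -- s[index], exact: index ∈ range(len(s))
      let u := if u.contains key then u else u.insert key []
      u.insert key (u.getD key [] ++ [index + 1]))
    PySem.Dict.empty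

-- body of A's third loop ('for item in u1:'), state = (dis, u2)
def pvStepA (u1 : PySem.Dict Int (List Int)) (st : Int × PySem.Dict Int (List Int))
    (item : Int) : Int × PySem.Dict Int (List Int) :=
  if !(st.2.contains item) then
    ((u1.getD item []).foldl (fun dis pos => dis + pos) st.1, st.2)
  else
    let p1 := u1.getD item []
    let p2 := st.2.getD item []                -- u2[item], exact: item ∈ u2 in this branch
    let len1 := PySem.List.len p1
    let len2 := PySem.List.len p2
    let dis :=
      if len1 > len2 then
        let dis := (PySem.List.pyRange 0 len2).foldl
          (fun dis index => dis + |PySem.List.pyGetD p1 index 0 - PySem.List.pyGetD p2 index 0|) st.1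
        (PySem.List.pyRange len2 len1).foldl
          (fun dis index => dis + PySem.List.pyGetD p1 index 0) dis
      else
        let dis := (PySem.List.pyRange 0 len1).foldl
          (fun dis index => dis + |PySem.List.pyGetD p1 index 0 - PySem.List.pyGetD p2 index 0|) st.1
        (PySem.List.pyRange len1 len2).foldl
          (fun dis index => dis + PySem.List.pyGetD p2 index 0) dis
    (dis, st.2.erase item)                      -- u2.pop(item): key present here, so pop = erase

def rankDistance_py (seq1 : List Int) (seq2 : List Int) : Int :=
  let u1 := pvBuild seq1
  let u2 := pvBuild seq2
  let st := u1.keys.foldl (pvStepA u1) (0, u2)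
  st.2.keys.foldl (fun dis item => (st.2.getD item []).foldl (fun dis pos => dis + pos) dis) st.1

-- ===== PORT B =====
-- Source B's counting loops: 'for v in seq: c[v] = c.get(v, 0) + 1'
def pvCnt (s : List Int) : PySem.Dict Int Int :=
  s.foldl (fun c v => c.insert v (c.getD v 0 + 1)) PySem.Dict.empty

-- Source B's first if-block of the scan (the seq1 side), state = (a1, a2, M)
def pvSub1 (seq1 : List Int) (c2 : PySem.Dict Int Int)
    (st : PySem.Dict Int Int × PySem.Dict Int Int × Int) (i : Int) :
    PySem.Dict Int Int × PySem.Dict Int Int × Int :=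
  if i < PySem.List.len seq1 then
    let v := PySem.List.pyGetD seq1 i 0        -- seq1[i], exact: 0 ≤ i < len
    let k := st.1.getD v 0
    (st.1.insert v (k + 1), st.2.1,
      if k < c2.getD v 0 ∧ st.2.1.getD v 0 ≤ k then st.2.2 + (i + 1) else st.2.2)
  else st

-- Source B's second if-block of the scan (the seq2 side; reads the already-updated a1)
def pvSub2 (seq2 : List Int) (c1 : PySem.Dict Int Int)
    (st : PySem.Dict Int Int × PySem.Dict Int Int × Int) (i : Int) :
    PySem.Dict Int Int × PySem.Dict Int Int × Int :=
  if i < PySem.List.len seq2 then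
    let w := PySem.List.pyGetD seq2 i 0
    let k := st.2.1.getD w 0
    (st.1, st.2.1.insert w (k + 1),
      if k < c1.getD w 0 ∧ st.1.getD w 0 ≤ k then st.2.2 + (i + 1) else st.2.2)
  else st

def pvScanStep (seq1 seq2 : List Int) (c1 c2 : PySem.Dict Int Int)
    (st : PySem.Dict Int Int × PySem.Dict Int Int × Int) (i : Int) :
    PySem.Dict Int Int × PySem.Dict Int Int × Int :=
  pvSub2 seq2 c1 (pvSub1 seq1 c2 st i) i

def rankDistance_py_alt (seq1 : List Int) (seq2 : List Int) : Int :=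
  let n := PySem.List.len seq1
  let m := PySem.List.len seq2
  let c1 := pvCnt seq1
  let c2 := pvCnt seq2
  let st := (PySem.List.pyRange 0 (max n m)).foldl (pvScanStep seq1 seq2 c1 c2)
      (PySem.Dict.empty, PySem.Dict.empty, 0)
  PySem.Int.floordiv (n * (n + 1)) 2 + PySem.Int.floordiv (m * (m + 1)) 2 - 2 * st.2.2

-- ===== PRECONDITION & SPEC =====
def Spec_rankDistance_py (seq1 : List Int) (seq2 : List Int) (out : Int) : Prop := out = rankDistance_py_alt seq1 seq2
instance (seq1 : List Int) (seq2 : List Int) (out : Int) : Decidable (Spec_rankDistance_py seq1 seq2 out) := by unfold Spec_rankDistance_py; infer_instance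

-- ===== CLAIM (what is proved, stated in full; the proofs are below) =====
def Claim_equal_rankDistance_py : Prop := ∀ (seq1 : List Int) (seq2 : List Int), Dom_rankDistance_py seq1 seq2 → Spec_rankDistance_py seq1 seq2 (rankDistance_py seq1 seq2)

-- ===== LEMMAS AND PROOFS =====

-- 1-based positions of v in s, and the cost pieces of A's third loop
def posL (s : List Int) (v : Int) : List Int :=
  ((PySem.List.enumerate s 1).filter (fun p => p.2 == v)).map (fun p => p.1)

def zipAbsSum (p q : List Int) : Int := (List.zipWith (fun a b => |a - b|) p q).sum

def costA (p q : List Int) : Int := zipAbsSum p q + (p.drop q.length).sum + (q.drop p.length).sum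

-- enumerate helpers
theorem enum_append (s : List Int) (x : Int) : ∀ a : Int,
    PySem.List.enumerate (s ++ [x]) a = PySem.List.enumerate s a ++ [(a + s.length, x)] := by
  induction s with
  | nil => intro a; simp [PySem.List.enumerate_cons, PySem.List.enumerate_nil]
  | cons y t ih =>
      intro a
      simp only [List.cons_append, PySem.List.enumerate_cons, ih (a + 1), List.length_cons]
      have : a + 1 + (t.length : Int) = a + ((t.length + 1 : ℕ) : Int) := by push_cast; ring
      rw [this]

theorem enum_shift {α : Type} (s : List α) : ∀ a : Int,
    PySem.List.enumerate s (a + 1) = (PySem.List.enumerate s a).map (fun p => (p.1 + 1, p.2)) := by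
  induction s with
  | nil => intro a; simp [PySem.List.enumerate_nil]
  | cons y t ih =>
      intro a
      simp only [PySem.List.enumerate_cons, List.map_cons, ih (a + 1)]

theorem mem_enum {α : Type} (s : List α) : ∀ (a : Int) (kp : Int × α),
    kp ∈ PySem.List.enumerate s a ↔ ∃ i : ℕ, i < s.length ∧ kp.1 = a + i ∧ kp.2 = s[i]? := by
  induction s with
  | nil => intro a kp; simp [PySem.List.enumerate_nil]
  | cons y t ih =>
      intro a kp
      simp only [PySem.List.enumerate_cons, List.mem_cons, ih (a + 1)]
      constructor
      · rintro (rfl | ⟨i, hi, h1, h2⟩)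
        · exact ⟨0, by simp⟩
        · exact ⟨i + 1, by simpa using hi, by push_cast; omega, by simpa using h2⟩
      · rintro ⟨i, hi, h1, h2⟩
        cases i with
        | zero =>
            left
            simp at h2
            obtain ⟨k, x⟩ := kp
            simp_all
        | succ j =>
            right
            exact ⟨j, by simpa using hi, by push_cast at h1 ⊢; omega, by simpa using h2⟩

theorem posL_append (s : List Int) (x v : Int) :
    posL (s ++ [x]) v = posL s v ++ (if x == v then [(1 : Int) + s.length] else []) := by
  unfold posL
  rw [enum_append s x 1]
  by_cases hx : x = v <;> simp [hx]

theorem posL_length (s : List Int) (v : Int) : (posL s v).length = s.count v := by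
  induction s using List.reverseRecOn with
  | nil => simp [posL, PySem.List.enumerate_nil]
  | append_singleton t x ih =>
      rw [posL_append]
      by_cases hx : x = v <;> simp [hx, ih, List.count_append]

theorem posL_nil_of_not_mem {s : List Int} {v : Int} (h : v ∉ s) : posL s v = [] := by
  unfold posL
  rw [List.map_eq_nil_iff, List.filter_eq_nil_iff]
  intro p hp hv
  exact h (by
    have : p.2 ∈ (PySem.List.enumerate s 1).map (fun x => x.2) := List.mem_map_of_mem hp
    rw [PySem.List.map_snd_enumerate] at this
    simp at hv
    rwa [hv] at this)

-- ===== A-side characterization =====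
theorem build_step_modify (d : PySem.Dict Int (List Int)) (key i : Int) :
    (let u := if d.contains key then d else d.insert key [];
     u.insert key (u.getD key [] ++ [i])) = d.modify key [] (fun x => x ++ [i]) := by
  by_cases h : d.contains key
  · simp [h, PySem.Dict.modify]
  · have h' : d.contains key = false := by simpa using h
    simp only [h', Bool.false_eq_true, ite_false, PySem.Dict.modify,
      PySem.Dict.getD_insert_self, PySem.Dict.insert_insert_self,
      PySem.Dict.getD_of_not_contains d [] h', List.nil_append]

theorem foldl_range_enum {β : Type} (s : List Int) (f : β → Int → Int → β) (init : β) :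
    (PySem.List.pyRange 0 (PySem.List.len s)).foldl
      (fun acc i => f acc i (PySem.List.pyGetD s i 0)) init
    = (PySem.List.enumerate s 0).foldl (fun acc p => f acc p.1 p.2) init := by
  induction s using List.reverseRecOn generalizing init with
  | nil => simp [PySem.List.enumerate_nil, PySem.List.pyRange_one_eq_nil]
  | append_singleton t x ih =>
      have hlen : PySem.List.len (t ++ [x]) = (t.length : Int) + 1 := by
        simp [PySem.List.len_eq]
      have hr : PySem.List.pyRange 0 (PySem.List.len (t ++ [x]))
          = PySem.List.pyRange 0 (t.length : Int) ++ [(t.length : Int)] := by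
        rw [hlen, PySem.List.pyRange_one_succ_right (by positivity)]
      rw [hr, List.foldl_append, enum_append t x 0, List.foldl_append]
      have hc : (PySem.List.pyRange 0 (t.length : Int)).foldl
          (fun acc i => f acc i (PySem.List.pyGetD (t ++ [x]) i 0)) init
          = (PySem.List.pyRange 0 (t.length : Int)).foldl
          (fun acc i => f acc i (PySem.List.pyGetD t i 0)) init := by
        apply PySem.List.foldl_congr_mem
        intro acc i hi
        rcases PySem.List.mem_pyRange_one.1 hi with ⟨h0, h1⟩
        rw [PySem.List.pyGetD_eq_getElem _ _ h0 (by simp; omega),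
            PySem.List.pyGetD_eq_getElem _ _ h0 (by omega),
            List.getElem_append_left (by omega)]
      rw [hc]
      have hlast : PySem.List.pyGetD (t ++ [x]) (t.length : Int) 0 = x := by
        rw [PySem.List.pyGetD_eq_getElem _ _ (by positivity) (by simp),
            List.getElem_concat_length (by simp)]
      simp only [List.foldl_cons, List.foldl_nil, ← PySem.List.len_eq, ih]
      simp [PySem.List.len_eq, hlast]

theorem build_eq (s : List Int) :
    pvBuild s = ((PySem.List.enumerate s 1).map (fun p => (p.2, p.1))).foldl
      (fun d p => d.modify p.1 [] (fun x => x ++ [p.2])) PySem.Dict.empty := by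
  unfold pvBuild
  have h0 : (PySem.List.pyRange 0 (PySem.List.len s)).foldl
      (fun u index =>
        let key := PySem.List.pyGetD s index 0
        let u := if u.contains key then u else u.insert key []
        u.insert key (u.getD key [] ++ [index + 1])) PySem.Dict.empty
      = (PySem.List.pyRange 0 (PySem.List.len s)).foldl
      (fun d i => d.modify (PySem.List.pyGetD s i 0) [] (fun x => x ++ [i + 1])) PySem.Dict.empty := by
    apply PySem.List.foldl_congr_mem
    intro acc i _
    exact build_step_modify acc (PySem.List.pyGetD s i 0) (i + 1)
  have h2 : (PySem.List.pyRange 0 (PySem.List.len s)).foldl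
      (fun d i => d.modify (PySem.List.pyGetD s i 0) [] (fun x => x ++ [i + 1])) PySem.Dict.empty
      = (PySem.List.enumerate s 0).foldl
      (fun acc p => acc.modify p.2 [] (fun x => x ++ [p.1 + 1])) PySem.Dict.empty :=
    foldl_range_enum s (fun d i v => d.modify v [] (fun x => x ++ [i + 1])) PySem.Dict.empty
  rw [h0, h2]
  have h1 : PySem.List.enumerate s 1 = (PySem.List.enumerate s 0).map (fun p => (p.1 + 1, p.2)) := by
    have := enum_shift s 0
    simpa using this
  rw [h1, List.map_map, List.foldl_map]
  rfl

theorem build_getD (s : List Int) (v : Int) : (pvBuild s).getD v [] = posL s v := by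
  rw [build_eq, PySem.Dict.getD_foldl_modify_append, PySem.Dict.getD_empty, List.nil_append,
      List.filter_map]
  unfold posL
  rw [List.map_map]
  rfl

theorem build_keys (s : List Int) : (pvBuild s).keys = PySem.List.dedup s := by
  rw [build_eq]
  have hk := PySem.Dict.keys_foldl_modify_key
    ((PySem.List.enumerate s 1).map (fun p => (p.2, p.1))) (fun p => p.1) []
    (fun _ p => fun x => x ++ [p.2]) PySem.Dict.empty
  rw [hk, PySem.Dict.keys_empty, PySem.Set.update_nil_left, PySem.List.dedup_eq_ofList,
      List.map_map]
  have h2 : ((fun (p : Int × Int) => p.1) ∘ fun (p : Int × Int) => (p.2, p.1)) = fun p => p.2 := rfl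
  rw [h2, PySem.List.map_snd_enumerate]

theorem erase_getD {d : PySem.Dict Int (List Int)} {k k' : Int} (h : k' ≠ k) :
    (d.erase k).getD k' [] = d.getD k' [] := by
  have key : ∀ l : List (Int × List Int),
      (l.filter (fun p => !(p.1 == k))).find? (fun p => p.1 == k') = l.find? (fun p => p.1 == k') := by
    intro l
    induction l with
    | nil => rfl
    | cons p t ih =>
        by_cases h1 : p.1 = k'
        · have hk : (p.1 == k) = false := by simp [h1]; exact h
          simp [h1, h]
        · by_cases hk : p.1 = k
          · simp [hk, ih, Ne.symm h]
          · simp [hk, h1, ih]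
  simp [PySem.Dict.erase, PySem.Dict.getD, PySem.Dict.get?, key]

theorem erase_keys (d : PySem.Dict Int (List Int)) (k : Int) :
    (d.erase k).keys = d.keys.filter (fun v => !(v == k)) := by
  show (d.items.filter (fun p => !(p.1 == k))).map (fun p => p.1)
      = (d.items.map (fun p => p.1)).filter (fun v => !(v == k))
  rw [List.filter_map]
  rfl

theorem erase_not_contains {d : PySem.Dict Int (List Int)} {k : Int} (h : d.contains k = false) :
    d.erase k = d := by
  apply PySem.Dict.ext
  show d.items.filter (fun p => !(p.1 == k)) = d.items
  rw [List.filter_eq_self]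
  intro p hp
  have := (List.any_eq_false.1 h) p hp
  simpa using this

theorem foldl_erase_getD (ks : List Int) : ∀ (d : PySem.Dict Int (List Int)) (v : Int), v ∉ ks →
    (ks.foldl PySem.Dict.erase d).getD v [] = d.getD v [] := by
  induction ks with
  | nil => intro d v _; rfl
  | cons x t ih =>
      intro d v hv
      rw [List.mem_cons, not_or] at hv
      simp only [List.foldl_cons]
      rw [ih _ v hv.2, erase_getD hv.1]

theorem foldl_erase_keys (ks : List Int) : ∀ d : PySem.Dict Int (List Int),
    (ks.foldl PySem.Dict.erase d).keys = d.keys.filter (fun v => decide (v ∉ ks)) := by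
  induction ks with
  | nil => intro d; simp
  | cons x t ih =>
      intro d
      simp only [List.foldl_cons]
      rw [ih, erase_keys, List.filter_filter]
      apply List.filter_congr
      intro v _
      by_cases h1 : v = x <;> by_cases h2 : v ∈ t <;> simp [h1, h2]

theorem zip_fold (p q : List Int) (dis : Int) (m : Int) (hm : m = ((min p.length q.length : ℕ) : Int)) :
    (PySem.List.pyRange 0 m).foldl
      (fun a i => a + |PySem.List.pyGetD p i 0 - PySem.List.pyGetD q i 0|) dis
    = dis + zipAbsSum p q := by
  have hlen : ((List.zipWith (fun a b => |a - b|) p q).length : Int) = m := by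
    simp [hm]
  have hcong : (PySem.List.pyRange 0 m).foldl
      (fun a i => a + |PySem.List.pyGetD p i 0 - PySem.List.pyGetD q i 0|) dis
      = (PySem.List.pyRange 0 m).foldl
      (fun a i => a + PySem.List.pyGetD (List.zipWith (fun a b => |a - b|) p q) i 0) dis := by
    apply PySem.List.foldl_congr_mem
    intro acc i hi
    rcases PySem.List.mem_pyRange_one.1 hi with ⟨h0, h1⟩
    rw [PySem.List.pyGetD_eq_getElem p _ h0 (by simp at hm; omega),
        PySem.List.pyGetD_eq_getElem q _ h0 (by simp at hm; omega),
        PySem.List.pyGetD_eq_getElem _ _ h0 (by omega),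
        List.getElem_zipWith]
  rw [hcong, ← hlen, PySem.List.foldl_pyRange_zero_pyGetD' (List.zipWith (fun a b => |a - b|) p q) 0
        (fun a b => a + b) dis]
  have := PySem.List.foldl_add (List.zipWith (fun a b => |a - b|) p q) id dis
  simpa [zipAbsSum] using this

theorem tail_fold (p : List Int) (a : Int) (ha : 0 ≤ a) (dis : Int) :
    (PySem.List.pyRange a (PySem.List.len p)).foldl
      (fun d i => d + PySem.List.pyGetD p i 0) dis = dis + (p.drop a.toNat).sum := by
  rw [PySem.List.foldl_pyRange_pyGetD p 0 (fun a b => a + b) dis ha]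
  have := PySem.List.foldl_add (p.drop a.toNat) id dis
  simpa using this

theorem sum_fold (p : List Int) (dis : Int) :
    p.foldl (fun d x => d + x) dis = dis + p.sum := by
  have := PySem.List.foldl_add p id dis
  simpa using this

theorem stepA_cost (u1 : PySem.Dict Int (List Int)) (st : Int × PySem.Dict Int (List Int)) (item : Int) :
    pvStepA u1 st item = (st.1 + costA (u1.getD item []) (st.2.getD item []), st.2.erase item) := by
  unfold pvStepA
  by_cases hc : st.2.contains item
  · simp only [hc, Bool.not_true, Bool.false_eq_true, if_false]
    set p1 := u1.getD item [] with hp1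
    set p2 := st.2.getD item [] with hp2
    by_cases hl : PySem.List.len p1 > PySem.List.len p2
    · simp only [hl, if_true]
      rw [zip_fold p1 p2 st.1 (PySem.List.len p2) (by simp [PySem.List.len_eq] at hl ⊢; omega)]
      rw [PySem.List.len_eq p2, show ((p2.length : ℕ) : Int) = ((p2.length : ℕ) : Int) from rfl]
      rw [show PySem.List.pyRange (p2.length : Int) (PySem.List.len p1) =
            PySem.List.pyRange ((p2.length : Int)) (PySem.List.len p1) from rfl]
      rw [tail_fold p1 (p2.length : Int) (by positivity) _]
      have hq : (p2.drop p1.length).sum = 0 := by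
        rw [List.drop_eq_nil_of_le (by simp [PySem.List.len_eq] at hl; omega)]
        rfl
      simp [costA, hq]
      ring
    · simp only [hl, if_false]
      rw [zip_fold p1 p2 st.1 (PySem.List.len p1) (by simp [PySem.List.len_eq] at hl ⊢; omega)]
      rw [PySem.List.len_eq p1]
      rw [tail_fold p2 (p1.length : Int) (by positivity) _]
      have hq : (p1.drop p2.length).sum = 0 := by
        rw [List.drop_eq_nil_of_le (by simp [PySem.List.len_eq] at hl; omega)]
        rfl
      simp [costA, hq]
      ring
  · have hc' : st.2.contains item = false := by simpa using hc
    simp only [hc', Bool.not_false, if_true]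
    rw [sum_fold, PySem.Dict.getD_of_not_contains _ _ hc', erase_not_contains hc']
    simp [costA, zipAbsSum]

theorem loopA (u1 : PySem.Dict Int (List Int)) : ∀ (ks : List Int) (d2 : PySem.Dict Int (List Int)) (dis : Int),
    ks.Nodup →
    (ks.foldl (pvStepA u1) (dis, d2)) =
      (dis + (ks.map (fun v => costA (u1.getD v []) (d2.getD v []))).sum, ks.foldl PySem.Dict.erase d2) := by
  intro ks
  induction ks with
  | nil => intro d2 dis _; simp
  | cons v t ih =>
      intro d2 dis hnd
      rw [List.nodup_cons] at hnd
      simp only [List.foldl_cons, stepA_cost]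
      rw [ih (d2.erase v) _ hnd.2]
      have hmap : t.map (fun w => costA (u1.getD w []) ((d2.erase v).getD w []))
          = t.map (fun w => costA (u1.getD w []) (d2.getD w [])) := by
        apply List.map_congr_left
        intro w hw
        rw [erase_getD (fun he => hnd.1 (by rw [← he]; exact hw))]
      rw [hmap]
      simp only [List.map_cons, List.sum_cons]
      rw [Prod.mk.injEq]
      exact ⟨by ring, rfl⟩

theorem A_characterization (s1 s2 : List Int) :
    rankDistance_py s1 s2 =
      ((PySem.List.dedup s1).map (fun v => costA (posL s1 v) (posL s2 v))).sum +
      (((PySem.List.dedup s2).filter (fun v => decide (v ∉ s1))).map (fun v => (posL s2 v).sum)).sum := by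
  have h0 : rankDistance_py s1 s2 =
      ((pvBuild s1).keys.foldl (pvStepA (pvBuild s1)) (0, pvBuild s2)).2.keys.foldl
        (fun dis item =>
          ((((pvBuild s1).keys.foldl (pvStepA (pvBuild s1)) (0, pvBuild s2)).2).getD item []).foldl
            (fun dis pos => dis + pos) dis)
        ((pvBuild s1).keys.foldl (pvStepA (pvBuild s1)) (0, pvBuild s2)).1 := rfl
  rw [h0, build_keys s1]
  rw [loopA (pvBuild s1) (PySem.List.dedup s1) (pvBuild s2) 0
        (by rw [PySem.List.dedup_eq_ofList]; exact PySem.Set.nodup_ofList s1)]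
  simp only [build_getD]
  rw [foldl_erase_keys, build_keys s2]
  have hkeys : (PySem.List.dedup s2).filter (fun v => decide (v ∉ PySem.List.dedup s1))
      = (PySem.List.dedup s2).filter (fun v => decide (v ∉ s1)) := by
    apply List.filter_congr
    intro v _
    simp
  rw [hkeys]
  have hbody : ((PySem.List.dedup s2).filter (fun v => decide (v ∉ s1))).foldl
      (fun dis item => (((PySem.List.dedup s1).foldl PySem.Dict.erase (pvBuild s2)).getD item []).foldl
        (fun dis pos => dis + pos) dis)
      (0 + ((PySem.List.dedup s1).map (fun v => costA (posL s1 v) (posL s2 v))).sum)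
      = ((PySem.List.dedup s2).filter (fun v => decide (v ∉ s1))).foldl
      (fun dis item => dis + (posL s2 item).sum)
      (0 + ((PySem.List.dedup s1).map (fun v => costA (posL s1 v) (posL s2 v))).sum) := by
    apply PySem.List.foldl_congr_mem
    intro acc v hv
    rw [List.mem_filter] at hv
    have hv1 : v ∉ PySem.List.dedup s1 := by
      have := hv.2
      simp at this
      simp
      exact this
    rw [foldl_erase_getD _ _ _ hv1, build_getD, sum_fold]
  rw [hbody, PySem.List.foldl_add _ (fun v => (posL s2 v).sum) _]
  ring

-- ===== B-side: posL structure lemmas =====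
theorem posL_cons (x : Int) (s : List Int) (v : Int) :
    posL (x :: s) v = (if x = v then [(1 : Int)] else []) ++ (posL s v).map (· + 1) := by
  unfold posL
  rw [PySem.List.enumerate_cons, enum_shift s 1, List.filter_cons, List.filter_map, List.map_map]
  by_cases hx : x = v <;> simp [hx, List.map_map] <;> rfl

theorem posL_pos (s : List Int) (v : Int) : ∀ p ∈ posL s v, 1 ≤ p := by
  intro p hp
  unfold posL at hp
  rcases List.mem_map.1 hp with ⟨e, he, rfl⟩
  rcases (mem_enum s 1 e).1 (List.mem_of_mem_filter he) with ⟨i, _, h1, _⟩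
  omega

theorem posL_getD_eq : ∀ (s : List Int) (v : Int) (i : ℕ) (hi : i < s.length),
    s[i] = v → (posL s v).getD ((s.take i).count v) 0 = (i : Int) + 1 := by
  intro s
  induction s with
  | nil => intro v i hi; simp at hi
  | cons x s' ih =>
      intro v i hi hv
      cases i with
      | zero =>
          simp at hv
          subst hv
          simp [posL_cons]
      | succ j =>
          simp at hv
          have hj : j < s'.length := by simpa using hi
          have hcnt_le : (s'.take j).count v < s'.count v := by
            have h1 : (s'.take (j+1)).count v ≤ s'.count v :=
              (List.take_sublist (j+1) s').count_le v
            have h2 : (s'.take (j+1)).count v = (s'.take j).count v + 1 := by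
              rw [List.take_add_one, List.getElem?_eq_getElem hj, hv]
              simp [List.count_append]
            omega
          have hlen : (s'.take j).count v < (posL s' v).length := by
            rw [posL_length]; exact hcnt_le
          rw [posL_cons, List.take_succ_cons]
          by_cases hx : x = v
          · subst hx
            rw [List.count_cons_self, if_pos rfl]
            show ((posL s' x).map (· + 1)).getD ((s'.take j).count x + 1 - 1) 0 = _
            rw [Nat.add_sub_cancel,
                List.getD_eq_getElem _ _ (by simpa using hlen), List.getElem_map]
            have := ih x j hj hv
            rw [List.getD_eq_getElem _ _ hlen] at this
            rw [this]
            push_cast; ring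
          · rw [List.count_cons_of_ne hx, if_neg hx, List.nil_append]
            rw [List.getD_eq_getElem _ _ (by simpa using hlen), List.getElem_map]
            have := ih v j hj hv
            rw [List.getD_eq_getElem _ _ hlen] at this
            rw [this]
            push_cast; ring

theorem posL_getD_ge : ∀ (s : List Int) (v : Int) (i k : ℕ),
    (s.take i).count v ≤ k → k < s.count v → (i : Int) + 1 ≤ (posL s v).getD k 0 := by
  intro s
  induction s with
  | nil => intro v i k _ hk; simp at hk
  | cons x s' ih =>
      intro v i k hle hk
      have hklen : k < (posL (x :: s') v).length := by rw [posL_length]; exact hk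
      cases i with
      | zero =>
          have hmem : (posL (x :: s') v).getD k 0 ∈ posL (x :: s') v := by
            rw [List.getD_eq_getElem _ _ hklen]
            exact List.getElem_mem _
          have := posL_pos (x :: s') v _ hmem
          omega
      | succ j =>
          rw [List.take_succ_cons] at hle
          rw [posL_cons] at hklen ⊢
          by_cases hx : x = v
          · subst hx
            rw [List.count_cons_self] at hle
            obtain ⟨k', rfl⟩ : ∃ k', k = k' + 1 := ⟨k - 1, by omega⟩
            have hk' : k' < s'.count x := by
              rw [List.count_cons_self] at hk; omega
            have hlen' : k' < (posL s' x).length := by rw [posL_length]; exact hk'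
            rw [if_pos rfl]
            show ((posL s' x).map (· + 1)).getD (k' + 1 - 1) 0 ≥ _
            rw [Nat.add_sub_cancel, List.getD_eq_getElem _ _ (by simpa using hlen'),
                List.getElem_map]
            have := ih x j k' (by omega) hk'
            rw [List.getD_eq_getElem _ _ hlen'] at this
            push_cast
            omega
          · rw [List.count_cons_of_ne hx] at hle
            have hk' : k < s'.count v := by
              rw [List.count_cons_of_ne hx] at hk; exact hk
            have hlen' : k < (posL s' v).length := by rw [posL_length]; exact hk'
            rw [if_neg hx, List.nil_append, List.getD_eq_getElem _ _ (by simpa using hlen'),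
                List.getElem_map]
            have := ih v j k hle hk'
            rw [List.getD_eq_getElem _ _ hlen'] at this
            push_cast
            omega

-- ===== B-side: the scan invariant =====
-- partial M: for every value, the prefix of paired minima already completed by time (i, j)
def midM (s1 s2 : List Int) (i j : ℕ) : Int :=
  ((PySem.List.dedup s1).map (fun v =>
    ((List.zipWith min (posL s1 v) (posL s2 v)).take
      (max ((s1.take i).count v) ((s2.take j).count v))).sum)).sum

theorem count_take_succ (s : List Int) (i : ℕ) (hi : i < s.length) (v : Int) :
    (s.take (i + 1)).count v = (s.take i).count v + (if s[i] = v then 1 else 0) := by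
  rw [List.take_add_one, List.getElem?_eq_getElem hi, List.count_append]
  by_cases h : s[i] = v <;> simp [h]

theorem sum_map_update (l : List Int) (hnd : l.Nodup) (v : Int) (g g' : Int → Int)
    (hsame : ∀ w, w ≠ v → g' w = g w) :
    (l.map g').sum = (l.map g).sum + (if v ∈ l then g' v - g v else 0) := by
  induction l with
  | nil => simp
  | cons x t ih =>
      rw [List.nodup_cons] at hnd
      by_cases hx : x = v
      · subst hx
        have hmap : t.map g' = t.map g := by
          apply List.map_congr_left
          intro w hw
          exact hsame w (fun he => hnd.1 (he ▸ hw))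
        simp [hmap]
        ring
      · have := ih hnd.2
        simp only [List.map_cons, List.sum_cons, this, hsame x hx, List.mem_cons]
        by_cases hv : v ∈ t <;> simp [hv, Ne.symm hx] <;> ring

theorem take_sum_succ (l : List Int) (j : ℕ) (hj : j < l.length) :
    (l.take (j + 1)).sum = (l.take j).sum + l.getD j 0 := by
  rw [List.sum_take_succ l j hj, List.getD_eq_getElem _ _ hj]

-- generic one-element bump of a take-prefix sum
theorem zip_take_bump (z : List Int) (k c : ℕ) (t : Int)
    (hval : c ≤ k → k < z.length → z.getD k 0 = t) :
    (z.take (max (k + 1) c)).sum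
      = (z.take (max k c)).sum + (if k < z.length ∧ c ≤ k then t else 0) := by
  by_cases hc : c ≤ k
  · rw [max_eq_left (by omega), max_eq_left hc]
    by_cases hkz : k < z.length
    · rw [take_sum_succ z k hkz, if_pos ⟨hkz, hc⟩, hval hc hkz]
    · rw [List.take_of_length_le (by omega), List.take_of_length_le (by omega),
          if_neg (by tauto)]
      ring
  · rw [max_eq_right (by omega), max_eq_right (by omega), if_neg (by tauto)]
    ring

-- the seq1-side pointwise bump of midM at value v = s1[i]
theorem bump1 (s1 s2 : List Int) (v : Int) (i : ℕ) (hi : i < s1.length) (hv : s1[i] = v) :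
    ((List.zipWith min (posL s1 v) (posL s2 v)).take
        (max ((s1.take (i + 1)).count v) ((s2.take i).count v))).sum
    = ((List.zipWith min (posL s1 v) (posL s2 v)).take
        (max ((s1.take i).count v) ((s2.take i).count v))).sum
      + (if (s1.take i).count v < s2.count v ∧ (s2.take i).count v ≤ (s1.take i).count v
          then (i : Int) + 1 else 0) := by
  have hcnt : (s1.take (i + 1)).count v = (s1.take i).count v + 1 := by
    rw [count_take_succ s1 i hi v, hv]; simp
  have hzlen : (List.zipWith min (posL s1 v) (posL s2 v)).length
      = min (s1.count v) (s2.count v) := by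
    rw [List.length_zipWith, posL_length, posL_length]
  have hks : (s1.take i).count v < s1.count v := by
    have := (List.take_sublist (i + 1) s1).count_le v
    omega
  have hval : (s2.take i).count v ≤ (s1.take i).count v →
      (s1.take i).count v < (List.zipWith min (posL s1 v) (posL s2 v)).length →
      (List.zipWith min (posL s1 v) (posL s2 v)).getD ((s1.take i).count v) 0 = (i : Int) + 1 := by
    intro hcle hkz
    have hk2 : (s1.take i).count v < s2.count v := by omega
    rw [List.getD_eq_getElem _ _ hkz, List.getElem_zipWith]
    have h1 : (posL s1 v)[(s1.take i).count v]'(by rw [posL_length]; exact hks) = (i : Int) + 1 := by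
      have := posL_getD_eq s1 v i hi hv
      rwa [List.getD_eq_getElem _ _ (by rw [posL_length]; exact hks)] at this
    have h2 : ((i : Int) + 1) ≤ (posL s2 v)[(s1.take i).count v]'(by rw [posL_length]; exact hk2) := by
      have := posL_getD_ge s2 v i ((s1.take i).count v) hcle hk2
      rwa [List.getD_eq_getElem _ _ (by rw [posL_length]; exact hk2)] at this
    simp only [h1]
    rw [min_eq_left h2]
  rw [hcnt, zip_take_bump _ _ _ _ hval, hzlen]
  have hiff : (List.count v (List.take i s1) < min (List.count v s1) (List.count v s2))
      = (List.count v (List.take i s1) < List.count v s2) := by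
    apply propext; omega
  simp only [hiff]

-- the seq2-side pointwise bump of midM at value v = s2[i] (a1 already at i+1)
theorem bump2 (s1 s2 : List Int) (v : Int) (i : ℕ) (hi : i < s2.length) (hv : s2[i] = v) :
    ((List.zipWith min (posL s1 v) (posL s2 v)).take
        (max ((s1.take (i + 1)).count v) ((s2.take (i + 1)).count v))).sum
    = ((List.zipWith min (posL s1 v) (posL s2 v)).take
        (max ((s1.take (i + 1)).count v) ((s2.take i).count v))).sum
      + (if (s2.take i).count v < s1.count v ∧ (s1.take (i + 1)).count v ≤ (s2.take i).count v
          then (i : Int) + 1 else 0) := by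
  have hcnt : (s2.take (i + 1)).count v = (s2.take i).count v + 1 := by
    rw [count_take_succ s2 i hi v, hv]; simp
  have hzlen : (List.zipWith min (posL s1 v) (posL s2 v)).length
      = min (s1.count v) (s2.count v) := by
    rw [List.length_zipWith, posL_length, posL_length]
  have hks : (s2.take i).count v < s2.count v := by
    have := (List.take_sublist (i + 1) s2).count_le v
    omega
  have hval : (s1.take (i + 1)).count v ≤ (s2.take i).count v →
      (s2.take i).count v < (List.zipWith min (posL s1 v) (posL s2 v)).length →
      (List.zipWith min (posL s1 v) (posL s2 v)).getD ((s2.take i).count v) 0 = (i : Int) + 1 := by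
    intro hcle hkz
    have hk1 : (s2.take i).count v < s1.count v := by omega
    rw [List.getD_eq_getElem _ _ hkz, List.getElem_zipWith]
    have h2 : (posL s2 v)[(s2.take i).count v]'(by rw [posL_length]; exact hks) = (i : Int) + 1 := by
      have := posL_getD_eq s2 v i hi hv
      rwa [List.getD_eq_getElem _ _ (by rw [posL_length]; exact hks)] at this
    have h1 : ((i : Int) + 1) ≤ (posL s1 v)[(s2.take i).count v]'(by rw [posL_length]; exact hk1) := by
      have := posL_getD_ge s1 v (i + 1) ((s2.take i).count v) hcle hk1
      rw [List.getD_eq_getElem _ _ (by rw [posL_length]; exact hk1)] at this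
      push_cast at this ⊢
      omega
    simp only [h2]
    rw [min_eq_right (by omega)]
  rw [hcnt, max_comm ((s1.take (i + 1)).count v) ((s2.take i).count v + 1),
      max_comm ((s1.take (i + 1)).count v) ((s2.take i).count v),
      zip_take_bump _ _ _ _ hval, hzlen]
  have hiff : (List.count v (List.take i s2) < min (List.count v s1) (List.count v s2))
      = (List.count v (List.take i s2) < List.count v s1) := by
    apply propext; omega
  simp only [hiff]

-- the invariant carried through the scan loop
def ScanOK (s1 s2 : List Int) (i : ℕ)
    (st : PySem.Dict Int Int × PySem.Dict Int Int × Int) : Prop :=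
  (∀ w, st.1.getD w 0 = ((s1.take i).count w : Int)) ∧
  (∀ w, st.2.1.getD w 0 = ((s2.take i).count w : Int)) ∧
  st.2.2 = midM s1 s2 i i

-- state after pvSub1 within step i
def MidOK (s1 s2 : List Int) (i : ℕ)
    (st : PySem.Dict Int Int × PySem.Dict Int Int × Int) : Prop :=
  (∀ w, st.1.getD w 0 = ((s1.take (i + 1)).count w : Int)) ∧
  (∀ w, st.2.1.getD w 0 = ((s2.take i).count w : Int)) ∧
  st.2.2 = midM s1 s2 (i + 1) i

theorem cnt_getD (s : List Int) (v : Int) : (pvCnt s).getD v 0 = (s.count v : Int) := by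
  unfold pvCnt
  rw [PySem.Dict.getD_foldl_insert_add_one, PySem.Dict.getD_empty]
  simp

theorem sub1_ok (s1 s2 : List Int) (i : ℕ) (st : PySem.Dict Int Int × PySem.Dict Int Int × Int)
    (h : ScanOK s1 s2 i st) : MidOK s1 s2 i (pvSub1 s1 (pvCnt s2) st (i : Int)) := by
  obtain ⟨h1, h2, h3⟩ := h
  unfold pvSub1
  by_cases hi : (i : Int) < PySem.List.len s1
  · have hi' : i < s1.length := by rw [PySem.List.len_eq] at hi; exact_mod_cast hi
    rw [if_pos hi]
    dsimp only [MidOK]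
    set v := PySem.List.pyGetD s1 (i : Int) 0 with hvdef
    have hv : s1[i] = v := by
      rw [hvdef, PySem.List.pyGetD_eq_getElem s1 0 (by positivity) (by exact_mod_cast hi')]
      simp
    refine ⟨?_, h2, ?_⟩
    · intro w
      rw [PySem.Dict.getD_insert]
      by_cases hw : w = v
      · subst hw
        rw [if_pos rfl, h1 v, count_take_succ s1 i hi' v, hv, if_pos rfl]
        push_cast; ring
      · rw [if_neg hw, h1 w, count_take_succ s1 i hi' w, hv, if_neg (fun he => hw he.symm)]
        simp
    · -- M update
      rw [h1 v, h2 v, h3, cnt_getD]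
      have hvmem : v ∈ PySem.List.dedup s1 := by
        rw [PySem.List.mem_dedup, ← hv]
        exact List.getElem_mem _
      have hupd := sum_map_update (PySem.List.dedup s1) (PySem.List.nodup_dedup s1) v
        (fun w => ((List.zipWith min (posL s1 w) (posL s2 w)).take
          (max ((s1.take i).count w) ((s2.take i).count w))).sum)
        (fun w => ((List.zipWith min (posL s1 w) (posL s2 w)).take
          (max ((s1.take (i + 1)).count w) ((s2.take i).count w))).sum)
        (by
          intro w hwv
          have hcc : (s1.take (i + 1)).count w = (s1.take i).count w := by
            rw [count_take_succ s1 i hi' w, hv, if_neg (fun he => hwv he.symm)]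
            omega
          simp only [hcc])
      unfold midM
      rw [hupd, if_pos hvmem]
      dsimp only
      rw [bump1 s1 s2 v i hi' hv]
      by_cases hcond : (s1.take i).count v < s2.count v ∧ (s2.take i).count v ≤ (s1.take i).count v
      · rw [if_pos hcond, if_pos (by exact_mod_cast hcond)]
        ring
      · rw [if_neg hcond, if_neg (by
            intro hcc
            exact hcond ⟨by exact_mod_cast hcc.1, by exact_mod_cast hcc.2⟩)]
        ring
  · rw [if_neg hi]
    have hn : s1.length ≤ i := by
      rw [PySem.List.len_eq] at hi; omega
    have htk : s1.take (i + 1) = s1.take i := by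
      rw [List.take_of_length_le hn, List.take_of_length_le (by omega)]
    exact ⟨fun w => by rw [h1 w, htk], h2, by rw [h3]; unfold midM; rw [htk]⟩

theorem sub2_ok (s1 s2 : List Int) (i : ℕ) (st : PySem.Dict Int Int × PySem.Dict Int Int × Int)
    (h : MidOK s1 s2 i st) : ScanOK s1 s2 (i + 1) (pvSub2 s2 (pvCnt s1) st (i : Int)) := by
  obtain ⟨h1, h2, h3⟩ := h
  unfold pvSub2
  by_cases hi : (i : Int) < PySem.List.len s2
  · have hi' : i < s2.length := by rw [PySem.List.len_eq] at hi; exact_mod_cast hi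
    rw [if_pos hi]
    dsimp only [ScanOK]
    set w0 := PySem.List.pyGetD s2 (i : Int) 0 with hwdef
    have hw : s2[i] = w0 := by
      rw [hwdef, PySem.List.pyGetD_eq_getElem s2 0 (by positivity) (by exact_mod_cast hi')]
      simp
    refine ⟨h1, ?_, ?_⟩
    · intro w
      rw [PySem.Dict.getD_insert]
      by_cases hww : w = w0
      · subst hww
        rw [if_pos rfl, h2 w0, count_take_succ s2 i hi' w0, hw, if_pos rfl]
        push_cast; ring
      · rw [if_neg hww, h2 w, count_take_succ s2 i hi' w, hw, if_neg (fun he => hww he.symm)]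
        simp
    · rw [h1 w0, h2 w0, h3, cnt_getD]
      have hupd := sum_map_update (PySem.List.dedup s1) (PySem.List.nodup_dedup s1) w0
        (fun w => ((List.zipWith min (posL s1 w) (posL s2 w)).take
          (max ((s1.take (i + 1)).count w) ((s2.take i).count w))).sum)
        (fun w => ((List.zipWith min (posL s1 w) (posL s2 w)).take
          (max ((s1.take (i + 1)).count w) ((s2.take (i + 1)).count w))).sum)
        (by
          intro w hwv
          have hcc : (s2.take (i + 1)).count w = (s2.take i).count w := by
            rw [count_take_succ s2 i hi' w, hw, if_neg (fun he => hwv he.symm)]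
            omega
          simp only [hcc])
      unfold midM
      rw [hupd]
      by_cases hmem : w0 ∈ PySem.List.dedup s1
      · rw [if_pos hmem]
        dsimp only
        rw [bump2 s1 s2 w0 i hi' hw]
        by_cases hcond : (s2.take i).count w0 < s1.count w0 ∧
            (s1.take (i + 1)).count w0 ≤ (s2.take i).count w0
        · rw [if_pos hcond, if_pos (by exact_mod_cast hcond)]
          ring
        · rw [if_neg hcond, if_neg (by
              intro hcc
              exact hcond ⟨by exact_mod_cast hcc.1, by exact_mod_cast hcc.2⟩)]
          ring
      · rw [if_neg hmem]
        have hnotmem : w0 ∉ s1 := by rwa [PySem.List.mem_dedup] at hmem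
        have hc0 : s1.count w0 = 0 := List.count_eq_zero.2 hnotmem
        rw [if_neg (by
            push_cast [hc0]
            intro hcc
            omega)]
        ring
  · rw [if_neg hi]
    have hn : s2.length ≤ i := by
      rw [PySem.List.len_eq] at hi; omega
    have htk : s2.take (i + 1) = s2.take i := by
      rw [List.take_of_length_le hn, List.take_of_length_le (by omega)]
    have htk1 : s1.take i ⊆ s1.take i := fun _ h => h
    refine ⟨?_, fun w => by rw [h2 w, htk], by rw [h3]; unfold midM; rw [htk]⟩
    · intro w
      exact h1 w

theorem scanInv (s1 s2 : List Int) : ∀ i : ℕ,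
    ScanOK s1 s2 i
      ((PySem.List.pyRange 0 (i : Int)).foldl (pvScanStep s1 s2 (pvCnt s1) (pvCnt s2))
        (PySem.Dict.empty, PySem.Dict.empty, 0)) := by
  intro i
  induction i with
  | zero =>
      rw [show ((0 : ℕ) : Int) = 0 from rfl, PySem.List.pyRange_one_eq_nil (by omega)]
      refine ⟨fun w => by simp [PySem.Dict.getD_empty], fun w => by simp [PySem.Dict.getD_empty], ?_⟩
      show (0 : Int) = midM s1 s2 0 0
      unfold midM
      simp
  | succ j ih =>
      have hr : PySem.List.pyRange 0 ((j + 1 : ℕ) : Int)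
          = PySem.List.pyRange 0 (j : Int) ++ [(j : Int)] := by
        push_cast
        exact PySem.List.pyRange_one_succ_right (by positivity)
      rw [hr, List.foldl_append, List.foldl_cons, List.foldl_nil]
      exact sub2_ok s1 s2 j _ (sub1_ok s1 s2 j _ ih)

-- ===== final assembly =====
theorem costA_min (p q : List Int) :
    costA p q = p.sum + q.sum - 2 * (List.zipWith min p q).sum := by
  unfold costA zipAbsSum
  induction p generalizing q with
  | nil => simp
  | cons a p' ih =>
      cases q with
      | nil => simp
      | cons b q' =>
          simp only [List.zipWith_cons_cons, List.sum_cons, List.drop_succ_cons,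
            List.length_cons]
          have habs : |a - b| + 2 * min a b = a + b := by
            rcases le_total a b with h | h
            · rw [abs_of_nonpos (by omega), min_eq_left h]; ring
            · rw [abs_of_nonneg (by omega), min_eq_right h]; ring
          have := ih q'
          omega

theorem sum_filter_split {α : Type} (g : α → Int) (p : α → Bool) (l : List α) :
    ((l.filter p).map g).sum + ((l.filter (fun x => !p x)).map g).sum = (l.map g).sum := by
  induction l with
  | nil => simp
  | cons x t ih =>
      by_cases hx : p x <;> simp [hx] <;> rw [← ih] <;> ring

theorem sum_groups {α : Type} (g : α → Int) (f : α → Int) :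
    ∀ (vs : List Int) (l : List α), vs.Nodup → (∀ e ∈ l, f e ∈ vs) →
    (vs.map (fun v => ((l.filter (fun x => f x == v)).map g).sum)).sum = (l.map g).sum := by
  intro vs
  induction vs with
  | nil =>
      intro l _ hcov
      have hl : l = [] := by
        cases l with
        | nil => rfl
        | cons a t => exact absurd (hcov a (List.mem_cons_self)) (List.not_mem_nil)
      simp [hl]
  | cons v vs' ih =>
      intro l hnd hcov
      rw [List.nodup_cons] at hnd
      simp only [List.map_cons, List.sum_cons]
      have hmap : vs'.map (fun w => ((l.filter (fun x => f x == w)).map g).sum)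
          = vs'.map (fun w => (((l.filter (fun x => !(f x == v))).filter (fun x => f x == w)).map g).sum) := by
        apply List.map_congr_left
        intro w hw
        have hwv : w ≠ v := fun he => hnd.1 (he ▸ hw)
        have hfil : (l.filter (fun x => !(f x == v))).filter (fun x => f x == w)
            = l.filter (fun x => f x == w) := by
          rw [List.filter_filter]
          apply List.filter_congr
          intro x _
          by_cases hx : f x = w
          · simp [hx, hwv]
          · simp [hx]
        rw [hfil]
      rw [hmap, ih (l.filter (fun x => !(f x == v))) hnd.2 ?_]
      · exact sum_filter_split g (fun x => f x == v) l
      · intro e he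
        rcases List.mem_filter.1 he with ⟨he1, he2⟩
        rcases List.mem_cons.1 (hcov e he1) with hfe | hfe
        · exfalso
          simp [hfe] at he2
        · exact hfe

-- the sum of all 1-based positions of s, grouped by value
theorem sum_posL (s : List Int) :
    ((PySem.List.dedup s).map (fun v => (posL s v).sum)).sum
      = ((PySem.List.enumerate s 1).map (fun e => e.1)).sum := by
  have hcov : ∀ e ∈ PySem.List.enumerate s 1, (e.2 : Int) ∈ PySem.List.dedup s := by
    intro e he
    rw [PySem.List.mem_dedup]
    have := List.mem_map_of_mem (f := fun x => x.2) he
    rwa [PySem.List.map_snd_enumerate] at this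
  have := sum_groups (fun (e : Int × Int) => e.1) (fun e => e.2) (PySem.List.dedup s)
    (PySem.List.enumerate s 1) (PySem.List.nodup_dedup s) hcov
  rw [← this]
  rfl

theorem sum_enum_fst (s : List Int) :
    2 * ((PySem.List.enumerate s 1).map (fun e => e.1)).sum
      = (s.length : Int) * ((s.length : Int) + 1) := by
  induction s using List.reverseRecOn with
  | nil => simp [PySem.List.enumerate_nil]
  | append_singleton t x ih =>
      rw [enum_append t x 1, List.map_append, List.sum_append]
      simp only [List.map_cons, List.map_nil, List.sum_cons, List.sum_nil, List.length_append,
        List.length_cons, List.length_nil]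
      push_cast
      push_cast at ih
      linarith

theorem floordiv_tri (s : List Int) :
    PySem.Int.floordiv ((s.length : Int) * ((s.length : Int) + 1)) 2
      = ((PySem.List.enumerate s 1).map (fun e => e.1)).sum := by
  rw [PySem.Int.floordiv_eq_ediv_of_pos (by omega), ← sum_enum_fst s]
  omega

theorem B_characterization (s1 s2 : List Int) :
    rankDistance_py_alt s1 s2 =
      ((PySem.List.enumerate s1 1).map (fun e => e.1)).sum
      + ((PySem.List.enumerate s2 1).map (fun e => e.1)).sum
      - 2 * ((PySem.List.dedup s1).map (fun v =>
          (List.zipWith min (posL s1 v) (posL s2 v)).sum)).sum := by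
  have h0 : rankDistance_py_alt s1 s2 =
      PySem.Int.floordiv (PySem.List.len s1 * (PySem.List.len s1 + 1)) 2
      + PySem.Int.floordiv (PySem.List.len s2 * (PySem.List.len s2 + 1)) 2
      - 2 * ((PySem.List.pyRange 0 (max (PySem.List.len s1) (PySem.List.len s2))).foldl
          (pvScanStep s1 s2 (pvCnt s1) (pvCnt s2))
          (PySem.Dict.empty, PySem.Dict.empty, 0)).2.2 := rfl
  set i0 : ℕ := max s1.length s2.length with hi0
  have hcast : max (PySem.List.len s1) (PySem.List.len s2) = ((i0 : ℕ) : Int) := by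
    rw [PySem.List.len_eq, PySem.List.len_eq, hi0]
    push_cast
    rfl
  have hM := (scanInv s1 s2 i0).2.2
  rw [h0, hcast, hM]
  have hmid : midM s1 s2 i0 i0 = ((PySem.List.dedup s1).map (fun v =>
      (List.zipWith min (posL s1 v) (posL s2 v)).sum)).sum := by
    unfold midM
    congr 1
    apply List.map_congr_left
    intro v _
    rw [List.take_of_length_le]
    rw [List.length_zipWith, posL_length, posL_length,
        List.take_of_length_le (by omega), List.take_of_length_le (by omega)]
    exact le_trans (min_le_left _ _) (le_max_left _ _)
  rw [hmid, PySem.List.len_eq, PySem.List.len_eq, floordiv_tri s1, floordiv_tri s2]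

theorem main_eq (s1 s2 : List Int) : rankDistance_py s1 s2 = rankDistance_py_alt s1 s2 := by
  rw [A_characterization, B_characterization]
  have hsplit : (PySem.List.dedup s1).map (fun v => costA (posL s1 v) (posL s2 v))
      = (PySem.List.dedup s1).map (fun v =>
          ((posL s1 v).sum + (posL s2 v).sum)
          + (-2) * (List.zipWith min (posL s1 v) (posL s2 v)).sum) := by
    apply List.map_congr_left
    intro v _
    rw [costA_min]
    ring
  rw [hsplit, PySem.List.sum_map_add_int, PySem.List.sum_map_add_int, List.sum_map_mul_left]
  -- sum of posL2 over dedup s1 restricted to values also in s2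
  have hqt1 : ((PySem.List.dedup s1).map (fun v => (posL s2 v).sum)).sum
      = (((PySem.List.dedup s1).filter (fun v => decide (v ∈ s2))).map
          (fun v => (posL s2 v).sum)).sum := by
    rw [← sum_filter_split (fun v => (posL s2 v).sum) (fun v => decide (v ∈ s2))
          (PySem.List.dedup s1)]
    have hz : (((PySem.List.dedup s1).filter (fun v => !(decide (v ∈ s2)))).map
        (fun v => (posL s2 v).sum)).sum = 0 := by
      apply List.sum_eq_zero
      intro x hx
      rcases List.mem_map.1 hx with ⟨v, hv, rfl⟩
      rcases List.mem_filter.1 hv with ⟨_, hv2⟩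
      have : v ∉ s2 := by simpa using hv2
      rw [posL_nil_of_not_mem this]
      rfl
    rw [hz]
    ring
  have hqt2 : ((PySem.List.dedup s2).map (fun v => (posL s2 v).sum)).sum
      = (((PySem.List.dedup s2).filter (fun v => decide (v ∈ s1))).map
          (fun v => (posL s2 v).sum)).sum
        + (((PySem.List.dedup s2).filter (fun v => decide (v ∉ s1))).map
          (fun v => (posL s2 v).sum)).sum := by
    rw [← sum_filter_split (fun v => (posL s2 v).sum) (fun v => decide (v ∈ s1))
          (PySem.List.dedup s2)]
    congr 1
    apply congrArg List.sum
    apply congrArg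
    apply List.filter_congr
    intro v _
    simp
  have hperm : ((PySem.List.dedup s1).filter (fun v => decide (v ∈ s2))).Perm
      ((PySem.List.dedup s2).filter (fun v => decide (v ∈ s1))) := by
    rw [List.perm_ext_iff_of_nodup ((PySem.List.nodup_dedup s1).filter _)
          ((PySem.List.nodup_dedup s2).filter _)]
    intro a
    simp only [List.mem_filter, PySem.List.mem_dedup, decide_eq_true_eq]
    tauto
  have hswap : (((PySem.List.dedup s1).filter (fun v => decide (v ∈ s2))).map
        (fun v => (posL s2 v).sum)).sum
      = (((PySem.List.dedup s2).filter (fun v => decide (v ∈ s1))).map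
        (fun v => (posL s2 v).sum)).sum :=
    (hperm.map _).sum_eq
  have hT1 := sum_posL s1
  have hT2 := sum_posL s2
  have hq : ((PySem.List.dedup s1).map (fun v => (posL s2 v).sum)).sum
      + (((PySem.List.dedup s2).filter (fun v => decide (v ∉ s1))).map
          (fun v => (posL s2 v).sum)).sum
      = ((PySem.List.enumerate s2 1).map (fun e => e.1)).sum := by
    rw [hqt1, hswap, ← hT2, hqt2]
  linarith [hq, hT1]

-- ===== VERDICT (by name: the statement is the Claim_ definition above) =====
theorem rankDistance_py_spec : Claim_equal_rankDistance_py := by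
  intro seq1 seq2 _
  unfold Spec_rankDistance_py
  exact main_eq seq1 seq2
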